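-- pv_equiv track=rewrite | github.com/d61cd312e02b/kata-hmm-pinyin | simple-pinyin.py | get_all_pinyin_list
-- ===== SOURCE A (Python) =====
-- def get_all_pinyin_list(pinyin_list):
--     all_pinyin_list = []
--     max_word_len = 4
--     for word_len in range(max_word_len, 0, -1):
--         if len(pinyin_list) > word_len:
--             rest_pinyin_list = get_all_pinyin_list(pinyin_list[word_len:])
--             if len(rest_pinyin_list) > 0:
--                 for rest_pinyin_list in rest_pinyin_list:
--                     all_pinyin_list.append(["'".join(pinyin_list[0:word_len])] + rest_pinyin_list)
--         elif len(pinyin_list) == word_len: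
--             all_pinyin_list.append(["'".join(pinyin_list[0:word_len])])
--
--     return all_pinyin_list
-- ===== SOURCE B (Python) =====
-- def get_all_pinyin_list(pinyin_list):
--     n = len(pinyin_list)
--     # dp[j] holds all segmentations of the suffix starting j positions after
--     # the current boundary i; filled bottom-up from the end of the list.
--     dp = [[]]
--     for i in range(n - 1, -1, -1):
--         m = n - i
--         parts = []
--         for word_len in range(4, 0, -1):
--             if m > word_len:
--                 chunk = "'".join(pinyin_list[i:i + word_len])
--                 for r in dp[word_len - 1]:
--                     parts.append([chunk] + r)
--             elif m == word_len:
--                 parts.append(["'".join(pinyin_list[i:])])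
--         dp.insert(0, parts)
--     return dp[0]
-- ===== Notes on version B (the rewrite author's own statement) =====
-- stated objective: alternative
-- what changed: Replaces the top-down recursion over suffixes by an iterative bottom-up DP table indexed by suffix start position, filled from the end of the list and read off at position 0.
import Mathlib
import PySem

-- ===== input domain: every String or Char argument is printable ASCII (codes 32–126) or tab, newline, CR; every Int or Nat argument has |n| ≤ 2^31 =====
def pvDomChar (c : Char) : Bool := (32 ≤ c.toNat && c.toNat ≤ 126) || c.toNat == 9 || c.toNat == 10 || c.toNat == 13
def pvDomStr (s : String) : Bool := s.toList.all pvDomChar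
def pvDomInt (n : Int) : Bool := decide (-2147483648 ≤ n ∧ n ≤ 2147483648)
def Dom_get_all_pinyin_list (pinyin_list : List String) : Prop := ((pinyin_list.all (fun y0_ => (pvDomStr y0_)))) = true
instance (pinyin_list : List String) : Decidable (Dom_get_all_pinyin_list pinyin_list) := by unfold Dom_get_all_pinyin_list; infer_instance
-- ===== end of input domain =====

-- B replaces A's top-down recursion by an iterative bottom-up DP table over suffix
-- start positions (alternative decomposition; same return value).

-- ===== PORT A =====
-- A's `for word_len in range(4, 0, -1)` counts word_len down; ported as the counter
-- recursion pyA_loop (word_len = w+1 at each step, stopping at 0), mutually recursive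
-- with the function itself.  Slices pinyin_list[word_len:] / pinyin_list[0:word_len]
-- have nonnegative in-range bounds, so they are exactly List.drop / List.take.
mutual
def get_all_pinyin_list (pinyin_list : List String) : List (List String) :=
  pyA_loop pinyin_list 4 []
termination_by (pinyin_list.length, 5)

def pyA_loop (pinyin_list : List String) (word_len : Nat)
    (all_pinyin_list : List (List String)) : List (List String) :=
  match word_len with
  | 0 => all_pinyin_list
  | w + 1 =>
    let acc :=
      if _h : pinyin_list.length > w + 1 then
        let rest_pinyin_list := get_all_pinyin_list (pinyin_list.drop (w + 1))
        if rest_pinyin_list.length > 0 then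
          all_pinyin_list ++ rest_pinyin_list.map
            (fun r => [PySem.Str.join "'" (pinyin_list.take (w + 1))] ++ r)
        else all_pinyin_list
      else if pinyin_list.length = w + 1 then
        all_pinyin_list ++ [[PySem.Str.join "'" (pinyin_list.take (w + 1))]]
      else all_pinyin_list
    pyA_loop pinyin_list w acc
termination_by (pinyin_list.length, word_len)
end

-- ===== PORT B =====
-- one row of the DP table: all segmentations of `suffix`, given dpRest where
-- dpRest[j] holds the segmentations of the suffix starting j+1 positions later
def pvAltRow (suffix : List String) (dpRest : List (List (List String))) :
    List (List String) :=
  ([4, 3, 2, 1] : List Nat).foldl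
    (fun parts word_len =>
      if suffix.length > word_len then
        parts ++ (dpRest.getD (word_len - 1) []).map
          (fun r => [PySem.Str.join "'" (suffix.take word_len)] ++ r)
      else if suffix.length = word_len then
        parts ++ [[PySem.Str.join "'" suffix]]
      else parts) []

-- the dp table, built from the end of the list (Source B's `dp.insert(0, parts)` loop:
-- the table grows at the front as i walks from n-1 down to 0)
def pvBuild : List String → List (List (List String))
  | [] => [[]]
  | x :: xs => pvAltRow (x :: xs) (pvBuild xs) :: pvBuild xs

def get_all_pinyin_list_alt (pinyin_list : List String) : List (List String) :=
  (pvBuild pinyin_list).headD []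

-- ===== PRECONDITION & SPEC =====
def Spec_get_all_pinyin_list (pinyin_list : List String) (out : List (List String)) : Prop := out = get_all_pinyin_list_alt pinyin_list
instance (pinyin_list : List String) (out : List (List String)) : Decidable (Spec_get_all_pinyin_list pinyin_list out) := by unfold Spec_get_all_pinyin_list; infer_instance

-- ===== CLAIM (what is proved, stated in full; the proofs are below) =====
def Claim_equal_get_all_pinyin_list : Prop := ∀ (pinyin_list : List String), Dom_get_all_pinyin_list pinyin_list → Spec_get_all_pinyin_list pinyin_list (get_all_pinyin_list pinyin_list)

-- ===== LEMMAS AND PROOFS =====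

-- the `if len(rest) > 0` guard in A is a no-op (mapping over an empty list appends
-- nothing); these lemmas remove it in the simp-normal shapes it appears in
lemma pv_guard_append {α β : Type} (acc : List β) (r : List α) (f : α → β) :
    (if 0 < r.length then acc ++ r.map f else acc) = acc ++ r.map f := by
  cases r <;> simp

lemma pv_guard_cons {α β : Type} (x : β) (r : List α) (f : α → β) :
    (if 0 < r.length then x :: r.map f else [x]) = x :: r.map f := by
  cases r <;> simp

lemma pv_guard_nil {α β : Type} (r : List α) (f : α → β) :
    (if 0 < r.length then r.map f else []) = r.map f := by
  cases r <;> simp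

lemma pv_guard_cons_append {α β : Type} (x : β) (m : List β) (r : List α) (f : α → β) :
    (if 0 < r.length then x :: (m ++ r.map f) else x :: m) = x :: (m ++ r.map f) := by
  cases r <;> simp

lemma pv_guard_append_append {α β : Type} (acc m : List β) (r : List α) (f : α → β) :
    (if 0 < r.length then acc ++ (m ++ r.map f) else acc ++ m) = acc ++ (m ++ r.map f) := by
  cases r <;> simp

-- indexing the mapped tails list is the function applied to the corresponding drop
lemma pv_mapA_tails_getD (f : List String → List (List String)) :
    ∀ (xs : List String) (j : Nat), j ≤ xs.length →
      ((xs.tails).map f).getD j [] = f (xs.drop j)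
  | [], 0, _ => by simp [List.tails]
  | [], j + 1, h => by simp at h
  | _ :: _, 0, _ => by simp [List.tails]
  | x :: xs, j + 1, h => by
    simpa [List.tails] using pv_mapA_tails_getD f xs j (by simpa using h)

-- the DP row recurrence reproduces one unfolding of A
-- the DP row recurrence reproduces one unfolding of A (case split on how the
-- suffix length compares with the word lengths 1..4)
lemma pv_row_eq (l : List String) (hl : l ≠ []) :
    pvAltRow l ((l.tail.tails).map get_all_pinyin_list) = get_all_pinyin_list l :=
  match l with
  | [] => absurd rfl hl
  | [a] => by
    rw [get_all_pinyin_list]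
    simp [pvAltRow, pyA_loop, List.tails, pv_guard_append, pv_guard_cons, pv_guard_nil,
      pv_guard_cons_append, pv_guard_append_append]
  | [a, b] => by
    rw [get_all_pinyin_list]
    simp [pvAltRow, pyA_loop, List.tails, pv_guard_append, pv_guard_cons, pv_guard_nil,
      pv_guard_cons_append, pv_guard_append_append]
  | [a, b, c] => by
    rw [get_all_pinyin_list]
    simp [pvAltRow, pyA_loop, List.tails, pv_guard_append, pv_guard_cons, pv_guard_nil,
      pv_guard_cons_append, pv_guard_append_append]
  | [a, b, c, d] => by
    rw [get_all_pinyin_list]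
    simp [pvAltRow, pyA_loop, List.tails, pv_guard_append, pv_guard_cons, pv_guard_nil,
      pv_guard_cons_append, pv_guard_append_append]
  | a :: b :: c :: d :: e :: rest => by
    rw [get_all_pinyin_list]
    simp [pvAltRow, pyA_loop, List.tails, pv_guard_append, pv_guard_cons, pv_guard_nil,
      pv_guard_cons_append, pv_guard_append_append]

lemma pv_build_eq (l : List String) :
    pvBuild l = (l.tails).map get_all_pinyin_list := by
  induction l with
  | nil => simp [pvBuild, List.tails, get_all_pinyin_list, pyA_loop]
  | cons x xs ih =>
    simp only [pvBuild, ih, List.tails]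
    exact congrArg (· :: _) (by simpa using pv_row_eq (x :: xs) (by simp))

-- ===== VERDICT (by name: the statement is the Claim_ definition above) =====
theorem get_all_pinyin_list_spec : Claim_equal_get_all_pinyin_list := by
  intro l _
  unfold Spec_get_all_pinyin_list get_all_pinyin_list_alt
  rw [pv_build_eq]
  cases l <;> simp [List.tails]
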